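-- pv_equiv track=rewrite | github.com/pjr2359/GreekConjugator | greek-conjugator/kaikki_parser.py | _parse_conjugation_tags
-- ===== SOURCE A (Python) =====
-- from typing import Dict, List, Set, Optional, Tuple
--
-- def _parse_conjugation_tags(form: str, tags: List[str]) -> Optional[Dict]:
--     """Parse conjugation information from form tags."""
--     # Map Kaikki tags to our schema
--     tense_mapping = {
--         'present': 'present',
--         'imperfect': 'imperfect',
--         'future': 'future',
--         'aorist': 'aorist',
--         'perfect': 'perfect',
--         'pluperfect': 'pluperfect'
--     }
--
--     mood_mapping = {
--         'indicative': 'indicative',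
--         'subjunctive': 'subjunctive',
--         'imperative': 'imperative',
--         'optative': 'optative'
--     }
--
--     voice_mapping = {
--         'active': 'active',
--         'passive': 'passive',
--         'middle': 'middle'
--     }
--
--     person_mapping = {
--         '1st': '1st',
--         '2nd': '2nd',
--         '3rd': '3rd'
--     }
--
--     number_mapping = {
--         'singular': 'singular',
--         'plural': 'plural'
--     }
--
--     # Extract information from tags
--     tense = None
--     mood = None
--     voice = None
--     person = None
--     number = None
--
--     for tag in tags:
--         if tag in tense_mapping:
--             tense = tense_mapping[tag]
--         elif tag in mood_mapping:
--             mood = mood_mapping[tag]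
--         elif tag in voice_mapping:
--             voice = voice_mapping[tag]
--         elif tag in person_mapping:
--             person = person_mapping[tag]
--         elif tag in number_mapping:
--             number = number_mapping[tag]
--
--     # Only return if we have meaningful conjugation info
--     if tense or mood or voice:
--         return {
--             'form': form,
--             'tense': tense or 'present',
--             'mood': mood or 'indicative',
--             'voice': voice or 'active',
--             'person': person,
--             'number': number
--         }
--
--     return None
-- ===== SOURCE B (Python) =====
-- _TENSES = {'present', 'imperfect', 'future', 'aorist', 'perfect', 'pluperfect'}
-- _MOODS = {'indicative', 'subjunctive', 'imperative', 'optative'}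
-- _VOICES = {'active', 'passive', 'middle'}
-- _PERSONS = {'1st', '2nd', '3rd'}
-- _NUMBERS = {'singular', 'plural'}
--
--
-- def _last_in(category, tags):
--     """Last tag belonging to the category, or None (categories are disjoint)."""
--     return next((t for t in reversed(tags) if t in category), None)
--
--
-- def _parse_conjugation_tags(form, tags):
--     tense = _last_in(_TENSES, tags)
--     mood = _last_in(_MOODS, tags)
--     voice = _last_in(_VOICES, tags)
--     person = _last_in(_PERSONS, tags)
--     number = _last_in(_NUMBERS, tags)
--
--     if tense or mood or voice:
--         return {
--             'form': form,
--             'tense': tense or 'present',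
--             'mood': mood or 'indicative',
--             'voice': voice or 'active',
--             'person': person,
--             'number': number
--         }
--     return None
-- ===== Notes on version B (the rewrite author's own statement) =====
-- stated objective: idiomatic
-- what changed: Replaces the single interleaved elif-chain loop carrying five mutable variables with five independent last-match extractions (next over reversed(tags) per disjoint category set), keeping the identical final block.
import Mathlib
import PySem

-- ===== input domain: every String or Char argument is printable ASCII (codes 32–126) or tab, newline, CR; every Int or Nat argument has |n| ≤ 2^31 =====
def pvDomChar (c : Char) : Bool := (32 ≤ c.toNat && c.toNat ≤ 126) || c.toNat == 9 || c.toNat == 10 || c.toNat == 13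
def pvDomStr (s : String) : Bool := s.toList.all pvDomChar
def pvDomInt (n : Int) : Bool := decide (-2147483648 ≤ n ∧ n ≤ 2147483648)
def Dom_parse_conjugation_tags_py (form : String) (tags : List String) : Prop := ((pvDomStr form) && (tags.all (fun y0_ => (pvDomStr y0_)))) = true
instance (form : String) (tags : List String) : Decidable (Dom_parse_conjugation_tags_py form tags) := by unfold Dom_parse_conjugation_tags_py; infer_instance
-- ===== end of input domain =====

-- B replaces A's single interleaved elif-chain loop (five mutable variables) by five
-- independent last-match extractions over the disjoint category sets; same return value.

-- ===== PORT A =====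
-- A's five identity mappings, as Python dicts
def pvTenseMap : PySem.Dict String String :=
  PySem.Dict.mk [("present", "present"), ("imperfect", "imperfect"), ("future", "future"),
                 ("aorist", "aorist"), ("perfect", "perfect"), ("pluperfect", "pluperfect")]
def pvMoodMap : PySem.Dict String String :=
  PySem.Dict.mk [("indicative", "indicative"), ("subjunctive", "subjunctive"),
                 ("imperative", "imperative"), ("optative", "optative")]
def pvVoiceMap : PySem.Dict String String :=
  PySem.Dict.mk [("active", "active"), ("passive", "passive"), ("middle", "middle")]
def pvPersonMap : PySem.Dict String String :=
  PySem.Dict.mk [("1st", "1st"), ("2nd", "2nd"), ("3rd", "3rd")]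
def pvNumberMap : PySem.Dict String String :=
  PySem.Dict.mk [("singular", "singular"), ("plural", "plural")]

-- state (tense, mood, voice, person, number); one loop iteration = A's elif chain
-- ('if tag in d: x = d[tag]' is the match on d.get? tag)
def pvStepA (s : Option String × Option String × Option String × Option String × Option String)
    (tag : String) : Option String × Option String × Option String × Option String × Option String :=
  match pvTenseMap.get? tag with
  | some v => (some v, s.2.1, s.2.2.1, s.2.2.2.1, s.2.2.2.2)
  | none =>
    match pvMoodMap.get? tag with
    | some v => (s.1, some v, s.2.2.1, s.2.2.2.1, s.2.2.2.2)
    | none =>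
      match pvVoiceMap.get? tag with
      | some v => (s.1, s.2.1, some v, s.2.2.2.1, s.2.2.2.2)
      | none =>
        match pvPersonMap.get? tag with
        | some v => (s.1, s.2.1, s.2.2.1, some v, s.2.2.2.2)
        | none =>
          match pvNumberMap.get? tag with
          | some v => (s.1, s.2.1, s.2.2.1, s.2.2.2.1, some v)
          | none => s

def parse_conjugation_tags_py (form : String) (tags : List String) :
    Option (List (String × Option String)) :=
  let r := tags.foldl pvStepA (none, none, none, none, none)
  -- Python truthiness: every mapping value is a nonempty literal, so 'x' / 'x or d' are
  -- exactly isSome / getD here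
  if r.1.isSome || r.2.1.isSome || r.2.2.1.isSome then
    some [("form", some form), ("tense", some (r.1.getD "present")),
          ("mood", some (r.2.1.getD "indicative")), ("voice", some (r.2.2.1.getD "active")),
          ("person", r.2.2.2.1), ("number", r.2.2.2.2)]
  else none

-- ===== PORT B =====
-- B's five category sets (Python set literals)
def pvTenseSet : PySem.Set String :=
  PySem.Set.ofList ["present", "imperfect", "future", "aorist", "perfect", "pluperfect"]
def pvMoodSet : PySem.Set String :=
  PySem.Set.ofList ["indicative", "subjunctive", "imperative", "optative"]
def pvVoiceSet : PySem.Set String := PySem.Set.ofList ["active", "passive", "middle"]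
def pvPersonSet : PySem.Set String := PySem.Set.ofList ["1st", "2nd", "3rd"]
def pvNumberSet : PySem.Set String := PySem.Set.ofList ["singular", "plural"]

-- next((t for t in reversed(tags) if t in category), None)
def pvLastIn (category : PySem.Set String) (tags : List String) : Option String :=
  tags.reverse.find? (fun t => category.contains t)

def parse_conjugation_tags_py_alt (form : String) (tags : List String) :
    Option (List (String × Option String)) :=
  let tense := pvLastIn pvTenseSet tags
  let mood := pvLastIn pvMoodSet tags
  let voice := pvLastIn pvVoiceSet tags
  let person := pvLastIn pvPersonSet tags
  let number := pvLastIn pvNumberSet tags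
  -- Python truthiness: category members are nonempty strings, so isSome / getD are exact
  if tense.isSome || mood.isSome || voice.isSome then
    some [("form", some form), ("tense", some (tense.getD "present")),
          ("mood", some (mood.getD "indicative")), ("voice", some (voice.getD "active")),
          ("person", person), ("number", number)]
  else none

-- ===== PRECONDITION & SPEC =====
def Spec_parse_conjugation_tags_py (form : String) (tags : List String) (out : Option (List (String × Option String))) : Prop := out = parse_conjugation_tags_py_alt form tags
instance (form : String) (tags : List String) (out : Option (List (String × Option String))) : Decidable (Spec_parse_conjugation_tags_py form tags out) := by unfold Spec_parse_conjugation_tags_py; infer_instance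

-- ===== CLAIM (what is proved, stated in full; the proofs are below) =====
def Claim_equal_parse_conjugation_tags_py : Prop := ∀ (form : String) (tags : List String), Dom_parse_conjugation_tags_py form tags → Spec_parse_conjugation_tags_py form tags (parse_conjugation_tags_py form tags)

-- ===== LEMMAS AND PROOFS =====

-- each identity dict answers get? exactly on its category set, with the tag itself as value
theorem getT_char (t : String) :
    pvTenseMap.get? t = if pvTenseSet.contains t then some t else none := by
  by_cases h : t ∈ (["present","imperfect","future","aorist","perfect","pluperfect"] : List String)
  · have hc : pvTenseSet.contains t = true := by
      rw [PySem.Set.contains_iff]; simp only [pvTenseSet, PySem.Set.mem_ofList]; exact h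
    rw [if_pos hc]
    simp only [List.mem_cons, List.not_mem_nil, or_false] at h
    rcases h with rfl|rfl|rfl|rfl|rfl|rfl <;> rfl
  · rw [if_neg (by simpa [pvTenseSet, PySem.Set.contains_iff, PySem.Set.mem_ofList] using h)]
    simp only [List.mem_cons, List.not_mem_nil, or_false, not_or] at h
    simp [pvTenseMap, PySem.Dict.get?, Ne.symm h.1, Ne.symm h.2.1,
      Ne.symm h.2.2.1, Ne.symm h.2.2.2.1, Ne.symm h.2.2.2.2.1, Ne.symm h.2.2.2.2.2]

theorem getM_char (t : String) :
    pvMoodMap.get? t = if pvMoodSet.contains t then some t else none := by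
  by_cases h : t ∈ (["indicative","subjunctive","imperative","optative"] : List String)
  · have hc : pvMoodSet.contains t = true := by
      rw [PySem.Set.contains_iff]; simp only [pvMoodSet, PySem.Set.mem_ofList]; exact h
    rw [if_pos hc]
    simp only [List.mem_cons, List.not_mem_nil, or_false] at h
    rcases h with rfl|rfl|rfl|rfl <;> rfl
  · rw [if_neg (by simpa [pvMoodSet, PySem.Set.contains_iff, PySem.Set.mem_ofList] using h)]
    simp only [List.mem_cons, List.not_mem_nil, or_false, not_or] at h
    simp [pvMoodMap, PySem.Dict.get?, Ne.symm h.1, Ne.symm h.2.1, Ne.symm h.2.2.1, Ne.symm h.2.2.2]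

theorem getV_char (t : String) :
    pvVoiceMap.get? t = if pvVoiceSet.contains t then some t else none := by
  by_cases h : t ∈ (["active","passive","middle"] : List String)
  · have hc : pvVoiceSet.contains t = true := by
      rw [PySem.Set.contains_iff]; simp only [pvVoiceSet, PySem.Set.mem_ofList]; exact h
    rw [if_pos hc]
    simp only [List.mem_cons, List.not_mem_nil, or_false] at h
    rcases h with rfl|rfl|rfl <;> rfl
  · rw [if_neg (by simpa [pvVoiceSet, PySem.Set.contains_iff, PySem.Set.mem_ofList] using h)]
    simp only [List.mem_cons, List.not_mem_nil, or_false, not_or] at h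
    simp [pvVoiceMap, PySem.Dict.get?, Ne.symm h.1, Ne.symm h.2.1, Ne.symm h.2.2]

theorem getP_char (t : String) :
    pvPersonMap.get? t = if pvPersonSet.contains t then some t else none := by
  by_cases h : t ∈ (["1st","2nd","3rd"] : List String)
  · have hc : pvPersonSet.contains t = true := by
      rw [PySem.Set.contains_iff]; simp only [pvPersonSet, PySem.Set.mem_ofList]; exact h
    rw [if_pos hc]
    simp only [List.mem_cons, List.not_mem_nil, or_false] at h
    rcases h with rfl|rfl|rfl <;> rfl
  · rw [if_neg (by simpa [pvPersonSet, PySem.Set.contains_iff, PySem.Set.mem_ofList] using h)]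
    simp only [List.mem_cons, List.not_mem_nil, or_false, not_or] at h
    simp [pvPersonMap, PySem.Dict.get?, Ne.symm h.1, Ne.symm h.2.1, Ne.symm h.2.2]

theorem getN_char (t : String) :
    pvNumberMap.get? t = if pvNumberSet.contains t then some t else none := by
  by_cases h : t ∈ (["singular","plural"] : List String)
  · have hc : pvNumberSet.contains t = true := by
      rw [PySem.Set.contains_iff]; simp only [pvNumberSet, PySem.Set.mem_ofList]; exact h
    rw [if_pos hc]
    simp only [List.mem_cons, List.not_mem_nil, or_false] at h
    rcases h with rfl|rfl <;> rfl
  · rw [if_neg (by simpa [pvNumberSet, PySem.Set.contains_iff, PySem.Set.mem_ofList] using h)]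
    simp only [List.mem_cons, List.not_mem_nil, or_false, not_or] at h
    simp [pvNumberMap, PySem.Dict.get?, Ne.symm h.1, Ne.symm h.2]

-- the five category sets are pairwise disjoint
theorem disjT (t : String) (h : t ∈ pvTenseSet) :
    t ∉ pvMoodSet ∧ t ∉ pvVoiceSet ∧ t ∉ pvPersonSet ∧ t ∉ pvNumberSet := by
  simp only [pvTenseSet, PySem.Set.mem_ofList, List.mem_cons, List.not_mem_nil, or_false] at h
  rcases h with rfl|rfl|rfl|rfl|rfl|rfl <;> decide

theorem disjM (t : String) (h : t ∈ pvMoodSet) :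
    t ∉ pvTenseSet ∧ t ∉ pvVoiceSet ∧ t ∉ pvPersonSet ∧ t ∉ pvNumberSet := by
  simp only [pvMoodSet, PySem.Set.mem_ofList, List.mem_cons, List.not_mem_nil, or_false] at h
  rcases h with rfl|rfl|rfl|rfl <;> decide

theorem disjV (t : String) (h : t ∈ pvVoiceSet) :
    t ∉ pvTenseSet ∧ t ∉ pvMoodSet ∧ t ∉ pvPersonSet ∧ t ∉ pvNumberSet := by
  simp only [pvVoiceSet, PySem.Set.mem_ofList, List.mem_cons, List.not_mem_nil, or_false] at h
  rcases h with rfl|rfl|rfl <;> decide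

theorem disjP (t : String) (h : t ∈ pvPersonSet) :
    t ∉ pvTenseSet ∧ t ∉ pvMoodSet ∧ t ∉ pvVoiceSet ∧ t ∉ pvNumberSet := by
  simp only [pvPersonSet, PySem.Set.mem_ofList, List.mem_cons, List.not_mem_nil, or_false] at h
  rcases h with rfl|rfl|rfl <;> decide

theorem disjN (t : String) (h : t ∈ pvNumberSet) :
    t ∉ pvTenseSet ∧ t ∉ pvMoodSet ∧ t ∉ pvVoiceSet ∧ t ∉ pvPersonSet := by
  simp only [pvNumberSet, PySem.Set.mem_ofList, List.mem_cons, List.not_mem_nil, or_false] at h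
  rcases h with rfl|rfl <;> decide

-- one elif-chain iteration updates each component independently (by disjointness)
theorem step_char (s : Option String × Option String × Option String × Option String × Option String)
    (t : String) :
    pvStepA s t =
      ((if pvTenseSet.contains t then some t else s.1),
       (if pvMoodSet.contains t then some t else s.2.1),
       (if pvVoiceSet.contains t then some t else s.2.2.1),
       (if pvPersonSet.contains t then some t else s.2.2.2.1),
       (if pvNumberSet.contains t then some t else s.2.2.2.2)) := by
  by_cases hT : t ∈ pvTenseSet
  · obtain ⟨m, v, p, n⟩ := disjT t hT
    simp [pvStepA, getT_char, hT, m, v, p, n]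
  · by_cases hM : t ∈ pvMoodSet
    · obtain ⟨a, v, p, n⟩ := disjM t hM
      simp [pvStepA, getT_char, getM_char, hM, a, v, p, n]
    · by_cases hV : t ∈ pvVoiceSet
      · obtain ⟨a, m, p, n⟩ := disjV t hV
        simp [pvStepA, getT_char, getM_char, getV_char, hV, a, m, p, n]
      · by_cases hP : t ∈ pvPersonSet
        · obtain ⟨a, m, v, n⟩ := disjP t hP
          simp [pvStepA, getT_char, getM_char, getV_char, getP_char, hP, a, m, v, n]
        · by_cases hN : t ∈ pvNumberSet
          · obtain ⟨a, m, v, p⟩ := disjN t hN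
            simp [pvStepA, getT_char, getM_char, getV_char, getP_char, getN_char, hN, a, m, v, p]
          · simp [pvStepA, getT_char, getM_char, getV_char, getP_char, getN_char, hT, hM, hV, hP, hN]

theorem lastIn_cons (X : PySem.Set String) (t : String) (ts : List String) :
    pvLastIn X (t :: ts) = (pvLastIn X ts).or (if X.contains t then some t else none) := by
  simp only [pvLastIn, List.reverse_cons, List.find?_append]
  by_cases hX : t ∈ X <;>
    cases hf : (ts.reverse.find? fun t => X.contains t) <;>
      simp [List.find?, hX, Option.or]

theorem or_if_comp (o : Option String) (c : Bool) (x : String) (sc : Option String) :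
    (o.or (if c then some x else none)).or sc = o.or (if c then some x else sc) := by
  cases o <;> cases c <;> simp [Option.or]

-- A's whole loop computes the five independent last-match extractions
theorem loop_char (tags : List String) :
    ∀ s, tags.foldl pvStepA s =
      ((pvLastIn pvTenseSet tags).or s.1, (pvLastIn pvMoodSet tags).or s.2.1,
       (pvLastIn pvVoiceSet tags).or s.2.2.1, (pvLastIn pvPersonSet tags).or s.2.2.2.1,
       (pvLastIn pvNumberSet tags).or s.2.2.2.2) := by
  induction tags with
  | nil => intro s; simp [pvLastIn, Option.or]
  | cons t ts ih =>
    intro s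
    simp only [List.foldl_cons, step_char, ih, lastIn_cons, or_if_comp]

-- ===== VERDICT (by name: the statement is the Claim_ definition above) =====
theorem parse_conjugation_tags_py_spec : Claim_equal_parse_conjugation_tags_py := by
  intro form tags _
  unfold Spec_parse_conjugation_tags_py parse_conjugation_tags_py parse_conjugation_tags_py_alt
  rw [loop_char]
  simp [Option.or_none]
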